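-- pv_equiv track=rewrite | github.com/iKeepRun/dataset-rag | app/import_process/agent/nodes/node_document_split.py | merge_short_section
-- ===== SOURCE A (Python) =====
-- def merge_short_section(final_sections, min_length):
--     """
--     合并小的文本块并且属于同一个父标题的文本
--     :param section:
--     :param min_length:
--     :return:
--     """
--     merge_short_result=[]
--     pre_section=None
--     for section in final_sections:
--         if pre_section is None:
--             pre_section=section
--             continue
--         is_pre_short= len(pre_section['content'])<min_length
--         # 判断是否属于同一个父标题,并且父标题不为空
--         is_same_parent=pre_section.get('parent_title') and (pre_section['parent_title']==section['parent_title'])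
--         if  is_pre_short and is_same_parent:
--             pre_section['content']+="\n\n"+section['content']
--         else:
--             merge_short_result.append(pre_section)
--             pre_section=section
--     # 添加最后一次结果
--     if pre_section is not None:
--         merge_short_result.append(pre_section)
--     return merge_short_result
-- ===== SOURCE B (Python) =====
-- def merge_short_section(final_sections, min_length):
--     """Merge adjacent short sections sharing the same non-empty parent title.
--
--     Two-phase algorithm instead of A's single fold with a pre_section sentinel:
--     phase 1 computes the merge-group boundaries with an integer length
--     accumulator (no string building at all); phase 2 materialises each group
--     by joining its contents once with '\n\n'.join.  Mutates the head dict of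
--     each group in place, like the original.
--     """
--     n = len(final_sections)
--     result = []
--     i = 0
--     while i < n:
--         parent = final_sections[i].get('parent_title')
--         j = i + 1
--         if parent and j < n:
--             acc = len(final_sections[i]['content'])
--             while j < n and final_sections[j].get('parent_title') == parent \
--                     and acc < min_length:
--                 acc += 2 + len(final_sections[j]['content'])
--                 j += 1
--         head = final_sections[i]
--         if j > i + 1:
--             head['content'] = "\n\n".join(final_sections[k]['content']
--                                           for k in range(i, j))
--         result.append(head)
--         i = j
--     return result
-- ===== Notes on version B (the rewrite author's own statement) =====
-- stated objective: faster
-- what changed: Two-phase algorithm instead of A's sentinel fold that grows strings: phase 1 finds each merge group's end with an integer length accumulator only, phase 2 builds each merged content with a single '\n\n'.join, so no intermediate strings are ever built.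
import Mathlib
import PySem

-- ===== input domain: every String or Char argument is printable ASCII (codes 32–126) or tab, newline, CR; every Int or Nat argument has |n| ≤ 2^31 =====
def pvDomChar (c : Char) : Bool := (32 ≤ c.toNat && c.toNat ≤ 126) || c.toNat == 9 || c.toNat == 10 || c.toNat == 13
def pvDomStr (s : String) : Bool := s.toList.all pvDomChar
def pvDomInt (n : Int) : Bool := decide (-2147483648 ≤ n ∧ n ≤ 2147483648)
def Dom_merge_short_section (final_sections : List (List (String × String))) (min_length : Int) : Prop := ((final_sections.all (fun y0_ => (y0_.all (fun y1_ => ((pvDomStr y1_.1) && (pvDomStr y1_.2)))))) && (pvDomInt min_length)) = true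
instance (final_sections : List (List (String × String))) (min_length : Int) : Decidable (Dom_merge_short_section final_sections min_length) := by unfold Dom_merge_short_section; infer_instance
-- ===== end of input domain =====

-- B replaces A's sentinel fold that grows strings by a two-phase algorithm: an integer
-- length accumulator finds each merge group's end, then one join builds its content.
-- A mutates the section dicts in place and B performs the same net mutation; the
-- equivalence proved here is about the RETURN value.

-- shared dict-access helpers (sections are Python dicts = assoc lists)
def secGet? (d : List (String × String)) (k : String) : Option String :=
  (PySem.Dict.mk d).get? k
def secSet (d : List (String × String)) (k v : String) : List (String × String) :=
  ((PySem.Dict.mk d).insert k v).items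
def secContent (d : List (String × String)) : String := (secGet? d "content").getD ""
def secParent (d : List (String × String)) : String := (secGet? d "parent_title").getD ""

-- ===== PORT A =====
-- d['content'] / section['parent_title'] raise KeyError when missing; those inputs are
-- excluded by Pre_, so the port reads them with a "" default (never hit inside Pre_).
def mergeA_step (min_length : Int)
    (st : List (List (String × String)) × Option (List (String × String)))
    (sec : List (String × String)) :
    List (List (String × String)) × Option (List (String × String)) :=
  match st with
  | (res, none) => (res, some sec)                      -- pre_section is None: adopt and continue
  | (res, some pre) =>
    let is_pre_short := decide (PySem.Str.len (secContent pre) < min_length)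
    -- truthiness of pre_section.get('parent_title'): None and "" are both falsy
    let is_same_parent := (secParent pre != "") && (secParent pre == secParent sec)
    if is_pre_short && is_same_parent then
      (res, some (secSet pre "content" (secContent pre ++ "\n\n" ++ secContent sec)))
    else
      (res ++ [pre], some sec)

def merge_short_section (final_sections : List (List (String × String))) (min_length : Int) :
    List (List (String × String)) :=
  match final_sections.foldl (mergeA_step min_length) ([], none) with
  | (res, none) => res
  | (res, some pre) => res ++ [pre]                     -- final flush of pre_section

-- ===== PORT B =====
-- phase-1 inner while loop: how many following sections join the head's group,
-- accumulating only the content LENGTH (acc) — no string is built here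
def groupLen (min_length : Int) (parent : String) (acc : Int) :
    List (List (String × String)) → Nat
  | [] => 0
  | sec :: rest =>
    if (secParent sec == parent) && decide (acc < min_length) then
      groupLen min_length parent (acc + 2 + PySem.Str.len (secContent sec)) rest + 1
    else 0

-- outer while loop: emit the group head (content joined once if anything merged),
-- continue at the first section past the group
def mergeB_go (min_length : Int) :
    List (List (String × String)) → List (List (String × String))
  | [] => []
  | head :: rest =>
    let parent := secParent head
    let k := if parent != "" && !rest.isEmpty then
        groupLen min_length parent (PySem.Str.len (secContent head)) rest
      else 0
    let head' := if 0 < k then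
        secSet head "content"
          (PySem.Str.join "\n\n" ((head :: rest.take k).map secContent))
      else head
    head' :: mergeB_go min_length (rest.drop k)
  termination_by l => l.length
  decreasing_by simp [List.length_drop]

def merge_short_section_alt (final_sections : List (List (String × String))) (min_length : Int) :
    List (List (String × String)) :=
  mergeB_go min_length final_sections

-- ===== PRECONDITION & SPEC =====
-- Pre_ restricts to well-formed inputs, excluding (exactly, up to the noted corner) the
-- inputs where A raises KeyError: a non-final section without 'content', a section
-- without 'parent_title' right after one whose parent_title is non-empty, and a final
-- section without 'content' that a merge may reach (predecessor with short content and
-- the same non-empty parent_title — slightly wider than A's exact raise set, which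
-- would need replaying the merge loop to tell whether the pending section already grew
-- past min_length); duplicate keys inside a section are excluded as unrepresentable in
-- a Python dict.
def Pre_merge_short_section (final_sections : List (List (String × String))) (min_length : Int) : Prop :=
  (∀ s ∈ final_sections.dropLast, ((PySem.Dict.mk s).contains "content") = true) ∧
  (∀ s ∈ final_sections, (s.map Prod.fst).Nodup) ∧
  (∀ p ∈ final_sections.zip final_sections.tail, secParent p.1 ≠ "" →
      ((PySem.Dict.mk p.2).contains "parent_title") = true) ∧
  (∀ p ∈ final_sections.dropLast.getLast?.toList.zip final_sections.getLast?.toList,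
      secParent p.1 ≠ "" → secParent p.1 = secParent p.2 →
      PySem.Str.len (secContent p.1) < min_length →
      ((PySem.Dict.mk p.2).contains "content") = true)
instance (final_sections : List (List (String × String))) (min_length : Int) :
    Decidable (Pre_merge_short_section final_sections min_length) := by
  unfold Pre_merge_short_section; infer_instance

def pvWitness_merge_short_section : (List (List (String × String))) × Int :=
  ([[("content", "ab"), ("parent_title", "t")], [("content", "cd"), ("parent_title", "t")]], 5)

def Spec_merge_short_section (final_sections : List (List (String × String))) (min_length : Int) (out : List (List (String × String))) : Prop := out = merge_short_section_alt final_sections min_length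
instance (final_sections : List (List (String × String))) (min_length : Int) (out : List (List (String × String))) : Decidable (Spec_merge_short_section final_sections min_length out) := by unfold Spec_merge_short_section; infer_instance

-- ===== CLAIM (what is proved, stated in full; the proofs are below) =====
def Claim_equal_merge_short_section : Prop := ∀ (final_sections : List (List (String × String))) (min_length : Int), Dom_merge_short_section final_sections min_length → Pre_merge_short_section final_sections min_length → Spec_merge_short_section final_sections min_length (merge_short_section final_sections min_length)

-- ===== LEMMAS AND PROOFS =====

theorem dict_mk_items (d : PySem.Dict String String) : PySem.Dict.mk d.items = d :=
  PySem.Dict.ext_iff.mpr rfl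

theorem secParent_secSet_content (d : List (String × String)) (v : String) :
    secParent (secSet d "content" v) = secParent d := by
  simp [secParent, secSet, secGet?, dict_mk_items,
    PySem.Dict.get?_insert_of_ne _ _ (by decide : "parent_title" ≠ "content")]

theorem secContent_secSet_content (d : List (String × String)) (v : String) :
    secContent (secSet d "content" v) = v := by
  simp [secContent, secSet, secGet?, dict_mk_items, PySem.Dict.get?_insert_self]

theorem secSet_secSet_content (d : List (String × String)) (v w : String) :
    secSet (secSet d "content" v) "content" w = secSet d "content" w := by
  simp [secSet, dict_mk_items, PySem.Dict.insert_insert_self]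

theorem join_single (a : String) : PySem.Str.join "\n\n" [a] = a := by
  apply String.toList_inj.mp
  simp [PySem.Str.join, PySem.Chars.join, List.intercalate]

theorem join_cons2 (a b : String) (xs : List String) :
    PySem.Str.join "\n\n" (a :: b :: xs) =
      a ++ "\n\n" ++ PySem.Str.join "\n\n" (b :: xs) := by
  apply String.toList_inj.mp
  simp [PySem.Str.join, PySem.Chars.join, List.intercalate]

-- "\n\n".join absorbs an already-glued first piece
theorem join_glue (a b : String) (xs : List String) :
    PySem.Str.join "\n\n" ((a ++ "\n\n" ++ b) :: xs) =
      a ++ "\n\n" ++ PySem.Str.join "\n\n" (b :: xs) := by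
  cases xs with
  | nil => rw [join_single, join_single]
  | cons x xs => rw [join_cons2, join_cons2]; simp [String.append_assoc]

theorem len_glue (a b : String) :
    PySem.Str.len (a ++ "\n\n" ++ b) = PySem.Str.len a + 2 + PySem.Str.len b := by
  rw [PySem.Str.len_append, PySem.Str.len_append]; rfl

theorem mergeB_go_nil (m : Int) : mergeB_go m [] = [] := by
  rw [mergeB_go.eq_def]

theorem mergeB_go_cons (m : Int) (head : List (String × String))
    (rest : List (List (String × String))) :
    mergeB_go m (head :: rest) =
      (let parent := secParent head
       let k := if parent != "" && !rest.isEmpty then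
           groupLen m parent (PySem.Str.len (secContent head)) rest
         else 0
       let head' := if 0 < k then
           secSet head "content"
             (PySem.Str.join "\n\n" ((head :: rest.take k).map secContent))
         else head
       head' :: mergeB_go m (rest.drop k)) := by
  rw [mergeB_go.eq_def]

-- a section that does not merge starts its own group
theorem groupLen_cons (m : Int) (parent : String) (acc : Int)
    (sec : List (String × String)) (l : List (List (String × String))) :
    groupLen m parent acc (sec :: l) =
      if (secParent sec == parent) && decide (acc < m) then
        groupLen m parent (acc + 2 + PySem.Str.len (secContent sec)) l + 1
      else 0 := rfl

theorem mergeB_skip (m : Int) (pre sec : List (String × String))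
    (l : List (List (String × String)))
    (h : (decide (PySem.Str.len (secContent pre) < m) &&
          ((secParent pre != "") && (secParent pre == secParent sec))) = false) :
    mergeB_go m (pre :: sec :: l) = pre :: mergeB_go m (sec :: l) := by
  rw [mergeB_go_cons]
  by_cases hne : secParent pre = ""
  · simp [hne]
  · have hc : ((secParent sec == secParent pre) &&
        decide (PySem.Str.len (secContent pre) < m)) = false := by
      cases hq : (secParent sec == secParent pre) with
      | false => simp
      | true =>
        have heq2 : (secParent pre == secParent sec) = true := by
          simp [beq_iff_eq.mp hq]
        have hb : (secParent pre != "") = true := by simp [bne_iff_ne, hne]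
        rw [hb, heq2] at h
        simp only [Bool.and_true] at h
        rw [h, Bool.and_false]
    have hg : groupLen m (secParent pre) (PySem.Str.len (secContent pre)) (sec :: l) = 0 := by
      rw [groupLen_cons, hc]
      simp
    have hk : (if (secParent pre != "") && !(List.isEmpty (sec :: l)) then
        groupLen m (secParent pre) (PySem.Str.len (secContent pre)) (sec :: l) else 0) = 0 := by
      rw [hg]; simp
    simp only [hk, List.drop_zero, Nat.lt_irrefl, if_false]

-- merging one section into the pending head leaves B's result unchanged
theorem mergeB_merge (m : Int) (pre sec : List (String × String))
    (l : List (List (String × String)))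
    (hne : secParent pre ≠ "")
    (heq : secParent sec = secParent pre)
    (hshort : PySem.Str.len (secContent pre) < m) :
    mergeB_go m
        (secSet pre "content" (secContent pre ++ "\n\n" ++ secContent sec) :: l) =
      mergeB_go m (pre :: sec :: l) := by
  have hcond : ((secParent sec == secParent pre) &&
      decide (PySem.Str.len (secContent pre) < m)) = true := by
    simp only [heq, beq_self_eq_true, Bool.true_and, decide_eq_true_eq]
    exact hshort
  have hg1 : groupLen m (secParent pre) (PySem.Str.len (secContent pre)) (sec :: l) =
      groupLen m (secParent pre)
        (PySem.Str.len (secContent pre) + 2 + PySem.Str.len (secContent sec)) l + 1 := by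
    rw [groupLen_cons, if_pos hcond]
  have hbne : (secParent pre != "") = true := by simp [bne_iff_ne, hne]
  rw [mergeB_go_cons, mergeB_go_cons]
  simp only [secParent_secSet_content, secContent_secSet_content, len_glue, hg1, hbne,
    List.isEmpty_cons, Bool.not_false, Bool.and_true, if_pos, Bool.true_and]
  cases l with
  | nil =>
    have hg0 : groupLen m (secParent pre)
        (PySem.Str.len (secContent pre) + 2 + PySem.Str.len (secContent sec)) [] = 0 := rfl
    simp only [List.isEmpty_nil, Bool.not_true, Bool.false_eq_true,
      if_false, hg0, Nat.lt_irrefl, Nat.zero_add, List.drop_succ_cons,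
      List.take_succ_cons, List.map_cons, List.map_nil, Nat.zero_lt_one, if_pos,
      List.take_nil, List.drop_nil]
    rw [join_cons2, join_single]
  | cons x l' =>
    set k' := groupLen m (secParent pre)
      (PySem.Str.len (secContent pre) + 2 + PySem.Str.len (secContent sec)) (x :: l') with hk'
    simp only [List.isEmpty_cons, Bool.not_false, if_pos, List.drop_succ_cons,
      List.take_succ_cons, List.map_cons, Nat.succ_pos, if_pos]
    by_cases hk0 : 0 < k'
    · rw [if_pos hk0]
      rw [secContent_secSet_content, secSet_secSet_content, join_glue, join_cons2]
    · have hk'0 : k' = 0 := Nat.eq_zero_of_not_pos hk0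
      rw [hk'0]
      simp only [Nat.lt_irrefl, if_false,
        List.take_zero, List.map_nil, List.drop_zero]
      rw [join_cons2, join_single]

def flushA (st : List (List (String × String)) × Option (List (String × String))) :
    List (List (String × String)) :=
  match st with
  | (res, none) => res
  | (res, some pre) => res ++ [pre]

-- the loop invariant: A's fold with pending section pre is B's run on pre :: l
theorem loopA_eq (m : Int) : ∀ (l : List (List (String × String)))
    (res : List (List (String × String))) (pre : List (String × String)),
    flushA (l.foldl (mergeA_step m) (res, some pre)) = res ++ mergeB_go m (pre :: l) := by
  intro l
  induction l with
  | nil =>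
    intro res pre
    rw [mergeB_go_cons]
    simp [flushA, mergeB_go_nil]
  | cons sec l ih =>
    intro res pre
    by_cases hC : (decide (PySem.Str.len (secContent pre) < m) &&
        ((secParent pre != "") && (secParent pre == secParent sec))) = true
    · have ha : mergeA_step m (res, some pre) sec =
          (res, some (secSet pre "content" (secContent pre ++ "\n\n" ++ secContent sec))) := by
        simp only [mergeA_step]; rw [if_pos hC]
      simp only [List.foldl_cons, ha, ih]
      simp only [Bool.and_eq_true, decide_eq_true_eq, bne_iff_ne, ne_eq, beq_iff_eq] at hC
      rw [mergeB_merge m pre sec l hC.2.1 hC.2.2.symm hC.1]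
    · have ha : mergeA_step m (res, some pre) sec = (res ++ [pre], some sec) := by
        simp only [mergeA_step]; rw [if_neg hC]
      simp only [List.foldl_cons, ha, ih]
      rw [mergeB_skip m pre sec l (Bool.eq_false_iff.mpr hC ▸ rfl)]
      simp

-- ===== VERDICT (by name: the statement is the Claim_ definition above) =====
theorem merge_short_section_spec : Claim_equal_merge_short_section := by
  intro final_sections min_length _ _
  unfold Spec_merge_short_section merge_short_section merge_short_section_alt
  cases final_sections with
  | nil => simp [mergeB_go_nil]
  | cons sec l =>
    have h0 : mergeA_step min_length ([], none) sec = ([], some sec) := rfl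
    have h := loopA_eq min_length l [] sec
    simp only [List.foldl_cons, h0]
    rw [show (match l.foldl (mergeA_step min_length) ([], some sec) with
      | (res, none) => res
      | (res, some pre) => res ++ [pre]) =
      flushA (l.foldl (mergeA_step min_length) ([], some sec)) from rfl, h]
    simp
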